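-- pv_equiv track=rewrite | github.com/terngkub/docker-1 | 02_bonus/python/npuzzle/heuristic.py | generate_rows_cols
-- ===== SOURCE A (Python) =====
-- def generate_rows_cols(puzzle_list, size):
--     rows = []
--     cols = []
--     for i in range(size):
--         tmp = puzzle_list[i * size:(i + 1) * size]
--         rows.append(tmp)
--         tmp = []
--         for y in range(size):
--             tmp.append(puzzle_list[i + (y * size)])
--         cols.append(tmp)
--     return rows, cols
-- ===== SOURCE B (Python) =====
-- def generate_rows_cols(puzzle_list, size):
--     rows = [puzzle_list[i * size:(i + 1) * size] for i in range(size)]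
--     cols = [list(col) for col in zip(*rows)]
--     return rows, cols
-- ===== Notes on version B (the rewrite author's own statement) =====
-- stated objective: idiomatic
-- what changed: B builds the rows by slicing as A does but derives the columns by transposing the rows with zip(*rows) instead of re-indexing the flat list with computed i+y*size offsets.
import Mathlib
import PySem

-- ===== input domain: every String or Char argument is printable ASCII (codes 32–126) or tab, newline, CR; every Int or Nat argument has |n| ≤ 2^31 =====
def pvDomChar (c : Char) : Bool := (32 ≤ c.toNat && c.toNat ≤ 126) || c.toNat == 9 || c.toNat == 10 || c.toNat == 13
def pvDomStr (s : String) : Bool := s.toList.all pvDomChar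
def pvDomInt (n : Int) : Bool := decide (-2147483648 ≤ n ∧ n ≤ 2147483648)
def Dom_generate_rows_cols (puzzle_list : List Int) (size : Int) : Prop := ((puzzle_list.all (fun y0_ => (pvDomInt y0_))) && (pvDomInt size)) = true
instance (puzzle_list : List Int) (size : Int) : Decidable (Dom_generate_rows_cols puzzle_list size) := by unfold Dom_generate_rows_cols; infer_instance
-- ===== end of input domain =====

-- B builds the rows by slicing as A does, but derives the columns by transposing the
-- rows (zip(*rows)) instead of re-indexing the flat list with i + y*size offsets (idiomatic).

-- ===== PORT A =====
def generate_rows_cols (puzzle_list : List Int) (size : Int) : List (List Int) × List (List Int) :=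
  (PySem.List.pyRange 0 size).foldl (fun acc i =>
    let row := PySem.List.slice puzzle_list (some (i * size)) (some ((i + 1) * size))
    -- inner loop: tmp.append(puzzle_list[i + y*size]); Python raises IndexError where
    -- pyGetD's index is out of range — those inputs are excluded by Pre_ below
    let col := (PySem.List.pyRange 0 size).foldl
      (fun tmp y => tmp ++ [PySem.List.pyGetD puzzle_list (i + y * size) 0]) []
    (acc.1 ++ [row], acc.2 ++ [col])) ([], [])

-- ===== PORT B =====
-- heads-and-tails of a list of rows: none iff some row is empty (zip stops there)
def pvHeadsTails : List (List Int) → Option (List Int × List (List Int))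
  | [] => some ([], [])
  | [] :: _ => none
  | (h :: t) :: rest => (pvHeadsTails rest).map (fun p => (h :: p.1, t :: p.2))

-- zip(*rows): emit the list of heads while every row is nonempty; fuel bounds the
-- number of emitted columns (first row's length suffices: zip stops at the shortest)
def pvZipStar : Nat → List (List Int) → List (List Int)
  | 0, _ => []
  | fuel + 1, rows =>
    match pvHeadsTails rows with
    | none => []
    | some (hs, ts) => hs :: pvZipStar fuel ts

def generate_rows_cols_alt (puzzle_list : List Int) (size : Int) : List (List Int) × List (List Int) :=
  let rows := (PySem.List.pyRange 0 size).map
    (fun i => PySem.List.slice puzzle_list (some (i * size)) (some ((i + 1) * size)))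
  (rows, pvZipStar (rows.headD []).length rows)

-- ===== PRECONDITION & SPEC =====
-- Pre_ excludes exactly the inputs where A raises IndexError: size ≥ 1 with fewer than
-- size*size elements (the column loop indexes up to size*size - 1).
def Pre_generate_rows_cols (puzzle_list : List Int) (size : Int) : Prop :=
  size ≤ 0 ∨ size * size ≤ (puzzle_list.length : Int)
instance (puzzle_list : List Int) (size : Int) : Decidable (Pre_generate_rows_cols puzzle_list size) := by unfold Pre_generate_rows_cols; infer_instance
def pvWitness_generate_rows_cols : List Int × Int := ([1, 2, 3, 4], 2)

def Spec_generate_rows_cols (puzzle_list : List Int) (size : Int) (out : List (List Int) × List (List Int)) : Prop := out = generate_rows_cols_alt puzzle_list size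
instance (puzzle_list : List Int) (size : Int) (out : List (List Int) × List (List Int)) : Decidable (Spec_generate_rows_cols puzzle_list size out) := by unfold Spec_generate_rows_cols; infer_instance

-- ===== CLAIM (what is proved, stated in full; the proofs are below) =====
def Claim_equal_generate_rows_cols : Prop := ∀ (puzzle_list : List Int) (size : Int), Dom_generate_rows_cols puzzle_list size → Pre_generate_rows_cols puzzle_list size → Spec_generate_rows_cols puzzle_list size (generate_rows_cols puzzle_list size)

-- ===== LEMMAS AND PROOFS =====

lemma pvHeadsTails_eq (rows : List (List Int)) (h : ∀ r ∈ rows, r ≠ []) :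
    pvHeadsTails rows = some (rows.map (fun r => r.headD 0), rows.map List.tail) := by
  induction rows with
  | nil => rfl
  | cons r rest ih =>
    cases r with
    | nil => exact absurd rfl (h [] (List.mem_cons_self))
    | cons x t =>
      simp only [pvHeadsTails, ih (fun r hr => h r (List.mem_cons_of_mem _ hr))]
      simp

lemma pvZipStar_rect (k : Nat) (rows : List (List Int)) (h : ∀ r ∈ rows, r.length = k) :
    pvZipStar k rows = (List.range k).map (fun j => rows.map (fun r => r.getD j 0)) := by
  induction k generalizing rows with
  | zero => simp [pvZipStar]
  | succ k ih =>
    have hne : ∀ r ∈ rows, r ≠ [] := by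
      intro r hr hnil; have := h r hr; simp [hnil] at this
    have htl : ∀ r ∈ rows.map List.tail, r.length = k := by
      intro r hr
      obtain ⟨s, hs, rfl⟩ := List.mem_map.mp hr
      have := h s hs; simp [List.length_tail, this]
    simp only [pvZipStar]
    rw [pvHeadsTails_eq rows hne]
    dsimp only
    rw [ih _ htl, List.range_succ_eq_map, List.map_cons, List.map_map]
    congr 1
    · apply List.map_congr_left
      intro r hr
      cases r with
      | nil => exact absurd rfl (hne [] hr)
      | cons x t => rfl
    · apply List.map_congr_left
      intro j _
      simp only [Function.comp, List.map_map]
      apply List.map_congr_left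
      intro r hr
      cases r with
      | nil => exact absurd rfl (hne [] hr)
      | cons x t => rfl

lemma pv_row_len (pl : List Int) (n a : Nat) (ha : a < n) (hlen : n * n ≤ pl.length) :
    (PySem.List.slice pl (some ((a : Int) * (n : Int))) (some (((a : Int) + 1) * (n : Int)))).length = n := by
  have h1 : ((a : Int) * (n : Int)) = ((a * n : Nat) : Int) := by push_cast; ring
  have h2 : (((a : Int) + 1) * (n : Int)) = (((a + 1) * n : Nat) : Int) := by push_cast; ring
  rw [h1, h2, PySem.List.slice_natCast]
  simp only [List.length_take, List.length_drop]
  have hub : a * n + n ≤ n * n := by nlinarith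
  have hsm : (a + 1) * n = a * n + n := Nat.succ_mul a n
  omega

lemma pv_row_getD (pl : List Int) (n a j : Nat) (ha : a < n) (hj : j < n) (hlen : n * n ≤ pl.length) :
    (PySem.List.slice pl (some ((a : Int) * (n : Int))) (some (((a : Int) + 1) * (n : Int)))).getD j 0
      = pl.getD (a * n + j) 0 := by
  have h1 : ((a : Int) * (n : Int)) = ((a * n : Nat) : Int) := by push_cast; ring
  have h2 : (((a : Int) + 1) * (n : Int)) = (((a + 1) * n : Nat) : Int) := by push_cast; ring
  have hub : a * n + n ≤ n * n := by nlinarith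
  have hsm : (a + 1) * n = a * n + n := Nat.succ_mul a n
  rw [h1, h2, PySem.List.slice_natCast]
  have hd : (a + 1) * n - a * n = n := by omega
  rw [hd]
  have hlt : j < (List.take n (List.drop (a * n) pl)).length := by
    simp only [List.length_take, List.length_drop]; omega
  rw [List.getD_eq_getElem _ _ hlt, List.getElem_take, List.getElem_drop,
      List.getD_eq_getElem _ _ (by omega : a * n + j < pl.length)]

theorem pv_main (puzzle_list : List Int) (size : Int)
    (hpre : Pre_generate_rows_cols puzzle_list size) :
    generate_rows_cols puzzle_list size = generate_rows_cols_alt puzzle_list size := by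
  by_cases hsz : size ≤ 0
  · have hR : PySem.List.pyRange 0 size = [] := by
      simp [PySem.List.pyRange]; omega
    simp [generate_rows_cols, generate_rows_cols_alt, hR, pvZipStar]
  · push Not at hsz
    obtain ⟨n, rfl⟩ : ∃ n : Nat, size = (n : Nat) := ⟨size.toNat, (Int.toNat_of_nonneg (le_of_lt hsz)).symm⟩
    have hn : 0 < n := by exact_mod_cast hsz
    have hlen : n * n ≤ puzzle_list.length := by
      rcases hpre with h | h
      · omega
      · exact_mod_cast h
    set rowF : Int → List Int := fun i =>
      PySem.List.slice puzzle_list (some (i * (n : Int))) (some ((i + 1) * (n : Int))) with hrowF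
    have hA : generate_rows_cols puzzle_list (n : Int) =
        ((List.map (fun k : Nat => (k : Int)) (List.range n)).map rowF,
         (List.map (fun k : Nat => (k : Int)) (List.range n)).map (fun i =>
           (List.map (fun k : Nat => (k : Int)) (List.range n)).map
             (fun y => PySem.List.pyGetD puzzle_list (i + y * (n : Int)) 0))) := by
      unfold generate_rows_cols
      rw [PySem.List.pyRange_zero_natCast]
      simp only [PySem.List.foldl_append_singleton_eq_map, List.nil_append]
      rw [PySem.List.foldl_prod_mk
        (fun (s : List (List Int)) (i : Int) => s ++ [rowF i])
        (fun (s : List (List Int)) (i : Int) => s ++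
          [(List.map (fun k : Nat => (k : Int)) (List.range n)).map
            (fun y => PySem.List.pyGetD puzzle_list (i + y * (n : Int)) 0)])]
      simp only [PySem.List.foldl_append_singleton_eq_map, List.nil_append]
    have hrows : generate_rows_cols_alt puzzle_list (n : Int) =
        ((List.map (fun k : Nat => (k : Int)) (List.range n)).map rowF,
          pvZipStar ((((List.map (fun k : Nat => (k : Int)) (List.range n)).map rowF).headD []).length)
            ((List.map (fun k : Nat => (k : Int)) (List.range n)).map rowF)) := by
      unfold generate_rows_cols_alt
      rw [PySem.List.pyRange_zero_natCast]
    set M := (List.map (fun k : Nat => (k : Int)) (List.range n)).map rowF with hM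
    clear_value M
    have hMlen : ∀ r ∈ M, r.length = n := by
      intro r hr
      rw [hM, List.map_map] at hr
      obtain ⟨a, ha, rfl⟩ := List.mem_map.mp hr
      exact pv_row_len puzzle_list n a (List.mem_range.mp ha) hlen
    have hMne : M ≠ [] := by
      rw [hM]
      simp only [ne_eq, List.map_eq_nil_iff, List.range_eq_nil]
      omega
    have hfuel : ((M.headD []).length) = n := by
      have hmem : M.headD [] ∈ M := by
        cases M with
        | nil => exact absurd rfl hMne
        | cons x xs => simp
      exact hMlen _ hmem
    rw [hA, hrows, hfuel, pvZipStar_rect n M hMlen]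
    congr 1
    rw [hM]
    simp only [List.map_map]
    apply List.map_congr_left
    intro a hamem
    have ha : a < n := List.mem_range.mp hamem
    simp only [Function.comp]
    apply List.map_congr_left
    intro b hbmem
    have hb : b < n := List.mem_range.mp hbmem
    simp only [Function.comp]
    have h1 : ((a : Int) + (b : Int) * (n : Int)) = ((a + b * n : Nat) : Int) := by push_cast; ring
    rw [h1, PySem.List.pyGetD_natCast]
    have h2 := pv_row_getD puzzle_list n b a hb ha hlen
    rw [hrowF]
    simp only at h2 ⊢
    rw [h2]
    congr 1
    ring

-- ===== VERDICT (by name: the statement is the Claim_ definition above) =====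
theorem generate_rows_cols_spec : Claim_equal_generate_rows_cols := by
  intro puzzle_list size _ hpre
  unfold Spec_generate_rows_cols
  exact pv_main puzzle_list size hpre
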